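-- pv_equiv track=rewrite | github.com/DMDung2k3/Intelligent-Video-Analysis-Retrieval-System | system.py | _generate_recovery_options
-- ===== SOURCE A (Python) =====
-- from typing import Dict, List, Any, Optional, Tuple, Callable
--
-- def _generate_recovery_options(health_report: Dict[str, Any]) -> List[Dict[str, str]]:
--     """Generate recovery options based on health issues"""
--     recovery_options = []
--
--     issues = health_report.get("issues", [])
--
--     # Check for common patterns
--     if any("metadata" in issue.lower() for issue in issues):
--         recovery_options.append({
--             "action": "rebuild_metadata",
--             "description": "Rebuild metadata from keyframes folder",
--             "command": "system.build_system(keyframes_folder, force_rebuild=True)"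
--         })
--
--     if any("index" in issue.lower() for issue in issues):
--         recovery_options.append({
--             "action": "rebuild_index",
--             "description": "Rebuild FAISS index from scratch",
--             "command": "system.build_system(keyframes_folder, force_rebuild=True)"
--         })
--
--     if any("inconsistent" in issue.lower() for issue in issues):
--         recovery_options.append({
--             "action": "full_rebuild",
--             "description": "Complete system rebuild (recommended)",
--             "command": "system.build_system(keyframes_folder, force_rebuild=True)"
--         })
--
--     if any("clip" in issue.lower() for issue in issues):
--         recovery_options.append({
--             "action": "restart_clip",
--             "description": "Restart CLIP processor",
--             "command": "system._initialize_ai_components()"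
--         })
--
--     return recovery_options
-- ===== SOURCE B (Python) =====
-- _KEYWORDS = ("metadata", "index", "inconsistent", "clip")
--
-- _OPTIONS = (
--     {
--         "action": "rebuild_metadata",
--         "description": "Rebuild metadata from keyframes folder",
--         "command": "system.build_system(keyframes_folder, force_rebuild=True)",
--     },
--     {
--         "action": "rebuild_index",
--         "description": "Rebuild FAISS index from scratch",
--         "command": "system.build_system(keyframes_folder, force_rebuild=True)",
--     },
--     {
--         "action": "full_rebuild",
--         "description": "Complete system rebuild (recommended)",
--         "command": "system.build_system(keyframes_folder, force_rebuild=True)",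
--     },
--     {
--         "action": "restart_clip",
--         "description": "Restart CLIP processor",
--         "command": "system._initialize_ai_components()",
--     },
-- )
--
--
-- def _generate_recovery_options(health_report):
--     """Single pass over the issues folds the matches into a 4-bit mask
--     (bit i set iff keyword i occurs in some lowercased issue), stopping
--     early once the mask saturates; the result is then decoded from the
--     mask's bits."""
--     mask = 0
--     for issue in health_report.get("issues", []):
--         low = issue.lower()
--         for i, kw in enumerate(_KEYWORDS):
--             if kw in low:
--                 mask |= 1 << i
--         if mask == 15:
--             break
--     out = []
--     for i, opt in enumerate(_OPTIONS):
--         if (mask >> i) & 1: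
--             out.append(dict(opt))
--     return out
-- ===== Notes on version B (the rewrite author's own statement) =====
-- stated objective: alternative
-- what changed: Replaces four staged any(...) scans (each re-lowercasing every issue) with a single fold over the issues that accumulates matches into a 4-bit mask and stops early once the mask saturates (all four keywords seen), after which the option list is decoded from the mask's bits.
import Mathlib
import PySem

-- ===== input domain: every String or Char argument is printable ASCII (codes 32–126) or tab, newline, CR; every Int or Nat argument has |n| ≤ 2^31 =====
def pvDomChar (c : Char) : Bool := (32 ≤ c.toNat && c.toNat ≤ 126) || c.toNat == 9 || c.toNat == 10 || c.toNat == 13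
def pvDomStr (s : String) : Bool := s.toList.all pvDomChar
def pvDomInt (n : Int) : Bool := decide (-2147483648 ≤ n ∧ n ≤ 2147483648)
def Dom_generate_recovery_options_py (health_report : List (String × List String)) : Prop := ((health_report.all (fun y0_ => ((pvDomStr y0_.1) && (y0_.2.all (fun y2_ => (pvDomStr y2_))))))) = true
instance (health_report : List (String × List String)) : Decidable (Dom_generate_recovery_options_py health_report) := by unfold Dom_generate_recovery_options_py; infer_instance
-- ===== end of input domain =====

-- B folds the issues once into a 4-bit match mask (with early exit at saturation) and decodes the option list from the bits; alternative decomposition, same result.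

-- ===== PORT A =====
def pvOptMetadata : List (String × String) :=
  [("action", "rebuild_metadata"),
   ("description", "Rebuild metadata from keyframes folder"),
   ("command", "system.build_system(keyframes_folder, force_rebuild=True)")]

def pvOptIndex : List (String × String) :=
  [("action", "rebuild_index"),
   ("description", "Rebuild FAISS index from scratch"),
   ("command", "system.build_system(keyframes_folder, force_rebuild=True)")]

def pvOptInconsistent : List (String × String) :=
  [("action", "full_rebuild"),
   ("description", "Complete system rebuild (recommended)"),
   ("command", "system.build_system(keyframes_folder, force_rebuild=True)")]

def pvOptClip : List (String × String) :=
  [("action", "restart_clip"),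
   ("description", "Restart CLIP processor"),
   ("command", "system._initialize_ai_components()")]

def generate_recovery_options_py (health_report : List (String × List String)) : List (List (String × String)) :=
  let issues := (PySem.Dict.mk health_report).getD "issues" []
  let recovery_options : List (List (String × String)) := []
  let recovery_options :=
    if issues.any (fun issue => PySem.Str.isIn "metadata" (PySem.Str.lower issue))
    then recovery_options ++ [pvOptMetadata] else recovery_options
  let recovery_options :=
    if issues.any (fun issue => PySem.Str.isIn "index" (PySem.Str.lower issue))
    then recovery_options ++ [pvOptIndex] else recovery_options
  let recovery_options :=
    if issues.any (fun issue => PySem.Str.isIn "inconsistent" (PySem.Str.lower issue))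
    then recovery_options ++ [pvOptInconsistent] else recovery_options
  let recovery_options :=
    if issues.any (fun issue => PySem.Str.isIn "clip" (PySem.Str.lower issue))
    then recovery_options ++ [pvOptClip] else recovery_options
  recovery_options

-- ===== PORT B =====
def pvKeywords : List String := ["metadata", "index", "inconsistent", "clip"]

def pvOptions : List (List (String × String)) :=
  [pvOptMetadata, pvOptIndex, pvOptInconsistent, pvOptClip]

-- the 'for issue ...: ... if mask == 15: break' loop of Source B (mask is a small nonnegative int, kept as Nat)
def pvMaskLoop (issues : List String) (mask : Nat) : Nat :=
  match issues with
  | [] => mask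
  | issue :: rest =>
    let low := PySem.Str.lower issue
    let mask := (PySem.List.enumerate pvKeywords).foldl
      (fun m p => if PySem.Str.isIn p.2 low then m ||| (1 <<< p.1.toNat) else m) mask
    if mask == 15 then mask else pvMaskLoop rest mask

def generate_recovery_options_py_alt (health_report : List (String × List String)) : List (List (String × String)) :=
  let issues := (PySem.Dict.mk health_report).getD "issues" []
  let mask := pvMaskLoop issues 0
  (PySem.List.enumerate pvOptions).foldl
    (fun out p => if (mask >>> p.1.toNat) &&& 1 != 0 then out ++ [p.2] else out) []

-- ===== PRECONDITION & SPEC =====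
def Spec_generate_recovery_options_py (health_report : List (String × List String)) (out : List (List (String × String))) : Prop := out = generate_recovery_options_py_alt health_report
instance (health_report : List (String × List String)) (out : List (List (String × String))) : Decidable (Spec_generate_recovery_options_py health_report out) := by unfold Spec_generate_recovery_options_py; infer_instance

-- ===== CLAIM =====
def Claim_equal_generate_recovery_options_py : Prop := ∀ (health_report : List (String × List String)), Dom_generate_recovery_options_py health_report → Spec_generate_recovery_options_py health_report (generate_recovery_options_py health_report)

-- ===== LEMMAS AND PROOFS =====

-- the canonical 4-bit encoding of four flags
def pvEnc (b1 b2 b3 b4 : Bool) : Nat :=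
  (if b1 then 1 else 0) ||| (if b2 then 2 else 0) ||| (if b3 then 4 else 0) ||| (if b4 then 8 else 0)

theorem pvEnc_le (b1 b2 b3 b4 : Bool) : pvEnc b1 b2 b3 b4 ≤ 15 := by
  cases b1 <;> cases b2 <;> cases b3 <;> cases b4 <;> decide

theorem pvEnc_or (a1 a2 a3 a4 b1 b2 b3 b4 : Bool) :
    pvEnc (a1 || b1) (a2 || b2) (a3 || b3) (a4 || b4) = pvEnc a1 a2 a3 a4 ||| pvEnc b1 b2 b3 b4 := by
  cases a1 <;> cases a2 <;> cases a3 <;> cases a4 <;>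
    cases b1 <;> cases b2 <;> cases b3 <;> cases b4 <;> decide

theorem pv_lor_le_15 {a b : Nat} (ha : a ≤ 15) (hb : b ≤ 15) : a ||| b ≤ 15 := by
  interval_cases a <;> interval_cases b <;> decide

theorem pv_15_lor {b : Nat} (hb : b ≤ 15) : 15 ||| b = 15 := by
  interval_cases b <;> decide

-- pull the start value out of the or-accumulating fold
theorem pv_foldl_or_start {α : Type} (P : α → Bool) (f : α → Nat) (l : List α) (a b : Nat) :
    l.foldl (fun m p => if P p then m ||| f p else m) (a ||| b)
      = a ||| l.foldl (fun m p => if P p then m ||| f p else m) b := by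
  induction l generalizing b with
  | nil => rfl
  | cons hd tl ih =>
    simp only [List.foldl_cons]
    by_cases h : P hd = true
    · rw [if_pos h, if_pos h, Nat.or_assoc, ih]
    · rw [if_neg h, if_neg h, ih]

-- the inner keyword fold from 0, as the canonical encoding of the four per-issue flags
theorem pv_maskOf (low : String) :
    (PySem.List.enumerate pvKeywords).foldl
      (fun m p => if PySem.Str.isIn p.2 low then m ||| (1 <<< p.1.toNat) else m) 0
      = pvEnc (PySem.Str.isIn "metadata" low) (PySem.Str.isIn "index" low)
              (PySem.Str.isIn "inconsistent" low) (PySem.Str.isIn "clip" low) := by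
  cases h1 : PySem.Str.isIn "metadata" low <;>
  cases h2 : PySem.Str.isIn "index" low <;>
  cases h3 : PySem.Str.isIn "inconsistent" low <;>
  cases h4 : PySem.Str.isIn "clip" low <;>
    · simp only [pvKeywords, PySem.List.enumerate_cons, PySem.List.enumerate_nil,
        List.foldl_cons, List.foldl_nil]
      rw [h1, h2, h3, h4]
      decide

-- the mask collected over the issues is the encoding of A's four any-flags
def pvEmask (issues : List String) : Nat :=
  pvEnc (issues.any (fun i => PySem.Str.isIn "metadata" (PySem.Str.lower i)))
        (issues.any (fun i => PySem.Str.isIn "index" (PySem.Str.lower i)))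
        (issues.any (fun i => PySem.Str.isIn "inconsistent" (PySem.Str.lower i)))
        (issues.any (fun i => PySem.Str.isIn "clip" (PySem.Str.lower i)))

theorem pvEmask_le (issues : List String) : pvEmask issues ≤ 15 := pvEnc_le _ _ _ _

theorem pvMaskLoop_eq (issues : List String) :
    ∀ (mask : Nat), mask ≤ 15 → pvMaskLoop issues mask = mask ||| pvEmask issues := by
  induction issues with
  | nil =>
    intro mask _
    simp [pvMaskLoop, pvEmask, pvEnc]
  | cons issue rest ih =>
    intro mask hmask
    have hsplit : pvEmask (issue :: rest) =
        pvEnc (PySem.Str.isIn "metadata" (PySem.Str.lower issue))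
              (PySem.Str.isIn "index" (PySem.Str.lower issue))
              (PySem.Str.isIn "inconsistent" (PySem.Str.lower issue))
              (PySem.Str.isIn "clip" (PySem.Str.lower issue)) ||| pvEmask rest := by
      simp only [pvEmask, List.any_cons]
      exact pvEnc_or _ _ _ _ _ _ _ _
    have hfold : (PySem.List.enumerate pvKeywords).foldl
        (fun m p => if PySem.Str.isIn p.2 (PySem.Str.lower issue) then m ||| (1 <<< p.1.toNat) else m) mask
        = mask ||| pvEnc (PySem.Str.isIn "metadata" (PySem.Str.lower issue))
              (PySem.Str.isIn "index" (PySem.Str.lower issue))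
              (PySem.Str.isIn "inconsistent" (PySem.Str.lower issue))
              (PySem.Str.isIn "clip" (PySem.Str.lower issue)) := by
      have := pv_foldl_or_start (fun p => PySem.Str.isIn p.2 (PySem.Str.lower issue))
        (fun p => 1 <<< p.1.toNat) (PySem.List.enumerate pvKeywords) mask 0
      simp only [Nat.or_zero] at this
      rw [this, pv_maskOf]
    simp only [pvMaskLoop, hfold, hsplit, ← Nat.or_assoc]
    have hle : mask ||| pvEnc (PySem.Str.isIn "metadata" (PySem.Str.lower issue))
              (PySem.Str.isIn "index" (PySem.Str.lower issue))
              (PySem.Str.isIn "inconsistent" (PySem.Str.lower issue))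
              (PySem.Str.isIn "clip" (PySem.Str.lower issue)) ≤ 15 :=
      pv_lor_le_15 hmask (pvEnc_le _ _ _ _)
    by_cases h15 : (mask ||| pvEnc (PySem.Str.isIn "metadata" (PySem.Str.lower issue))
              (PySem.Str.isIn "index" (PySem.Str.lower issue))
              (PySem.Str.isIn "inconsistent" (PySem.Str.lower issue))
              (PySem.Str.isIn "clip" (PySem.Str.lower issue))) = 15
    · rw [if_pos (by simpa using h15), h15, pv_15_lor (pvEmask_le rest)]
    · rw [if_neg (by simpa using h15), ih _ hle]

-- ===== VERDICT =====
theorem generate_recovery_options_py_spec : Claim_equal_generate_recovery_options_py := by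
  intro health_report _
  unfold Spec_generate_recovery_options_py generate_recovery_options_py generate_recovery_options_py_alt
  simp only []
  generalize (PySem.Dict.mk health_report).getD "issues" [] = issues
  rw [pvMaskLoop_eq issues 0 (by decide), Nat.zero_or]
  unfold pvEmask
  cases h1 : issues.any (fun i => PySem.Str.isIn "metadata" (PySem.Str.lower i)) <;>
  cases h2 : issues.any (fun i => PySem.Str.isIn "index" (PySem.Str.lower i)) <;>
  cases h3 : issues.any (fun i => PySem.Str.isIn "inconsistent" (PySem.Str.lower i)) <;>
  cases h4 : issues.any (fun i => PySem.Str.isIn "clip" (PySem.Str.lower i)) <;>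
    simp [pvEnc, pvOptions, PySem.List.enumerate]
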